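-- pv_equiv track=rewrite | github.com/LILILIHANG/leetleetcocode | leecode/mid_41. 避免洪水泛滥.py | func
-- ===== SOURCE A (Python) =====
-- def func(rains):
--     dic={}
--     lst=[]
--     res=[]
--     for a, b in enumerate(rains):
--         #当前天没有池塘下雨
--         if not b:
--             #res记录每天是否池塘降水，有记录为-1，没有记录为0
--             res.append(b)
--             #lst记录哪天不降水
--             lst.append(a)
--         #当前下雨的池塘之前也下过雨，所以需要对当前池塘抽水，需要找到当前池塘第一次降雨的天数dic[b]
--         elif b in dic:
--             #用来记录是否有需要抽水的池塘是否有不下雨的天可以抽水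
--             biaozhi=False
--             #循环遍历lst中存的不下雨的天数
--             for i ,j in enumerate(lst):
--                 #当前池塘第一次降雨的天数dic[b]之后有不下雨的天j
--                 if j>dic[b]:
--                     lst.pop(i)
--                     #将结果集res中对应天j的抽水池塘b记录下来
--                     res[j]=b
--                     #然后将当前下雨天在res中记录为-1
--                     res.append(-1)
--                     #在dic中记录当前池塘b下雨的天数
--                     dic[b]=a
--                     #处理完当前需要抽水的池塘，将标志位设为True
--                     biaozhi=True
--                     break
--             #有需要抽水的池塘但是没有能够抽水的天，返回[]
--             if not biaozhi:
--                 return []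
--         #当前池塘下雨，但是之前没下过
--         else:
--             #dic中只记录下雨天{哪个池塘：哪天下雨}
--             dic[b]=a
--             res.append(-1)
--     #如果遍历完，res中存在0（不下雨的天没有进行任何抽水），则设为0
--     for i, j in enumerate(res):
--         if not j:
--             res[i]=1
--     return res
-- ===== SOURCE B (Python) =====
-- def func(rains):
--     last = {}
--     dry = []   # indices of dry days, always kept in increasing order
--     res = []
--     for day, lake in enumerate(rains):
--         if lake == 0:
--             res.append(0)
--             dry.append(day)
--         elif lake in last:
--             # binary search: smallest dry day strictly after last[lake]
--             lo, hi = 0, len(dry)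
--             while lo < hi:
--                 mid = (lo + hi) // 2
--                 if dry[mid] <= last[lake]:
--                     lo = mid + 1
--                 else:
--                     hi = mid
--             if lo == len(dry):
--                 return []
--             j = dry.pop(lo)
--             res[j] = lake
--             res.append(-1)
--             last[lake] = day
--         else:
--             last[lake] = day
--             res.append(-1)
--     return [1 if v == 0 else v for v in res]
-- ===== Notes on version B (the rewrite author's own statement) =====
-- stated objective: alternative
-- what changed: The inner linear scan over the dry-day list (A scans it from the front on every repeated rain to find the first dry day after the lake's last rain) is replaced by a binary search on that list, which is always kept in increasing order.
import Mathlib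
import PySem

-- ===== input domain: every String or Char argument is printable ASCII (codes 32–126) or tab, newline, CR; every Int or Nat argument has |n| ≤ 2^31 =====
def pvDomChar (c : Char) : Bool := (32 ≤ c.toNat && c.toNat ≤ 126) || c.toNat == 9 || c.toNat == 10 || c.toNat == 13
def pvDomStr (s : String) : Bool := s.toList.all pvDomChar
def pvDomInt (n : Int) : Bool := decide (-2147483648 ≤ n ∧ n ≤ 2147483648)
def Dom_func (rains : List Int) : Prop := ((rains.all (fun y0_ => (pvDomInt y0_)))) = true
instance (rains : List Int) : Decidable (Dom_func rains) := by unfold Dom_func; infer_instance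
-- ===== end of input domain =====

-- B replaces A's inner linear scan over the dry-day list by a binary search
-- (the dry-day list is always kept in increasing order); objective: alternative.

-- ===== PORT A =====
-- the inner 'for i, j in enumerate(lst): if j > d: lst.pop(i); … break' loop:
-- pops the first element of lst that is > d (none = no such element, biaozhi stays False)
def findPop (d : Nat) : List Nat → Option (Nat × List Nat)
  | [] => none
  | j :: rest =>
    if d < j then some (j, rest)
    else (findPop d rest).map (fun p => (p.1, j :: p.2))

-- the main 'for a, b in enumerate(rains)' loop; none = the early 'return []'
def loopA : List Int → Nat → PySem.Dict Int Nat → List Nat → List Int → Option (List Int)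
  | [], _, _, _, res => some res
  | b :: rs, a, dic, lst, res =>
    if b = 0 then
      loopA rs (a + 1) dic (lst ++ [a]) (res ++ [b])
    else
      match dic.get? b with
      | some db =>
        match findPop db lst with
        | some (j, lst') => loopA rs (a + 1) (dic.insert b a) lst' ((res.set j b) ++ [-1])
        | none => none
      | none => loopA rs (a + 1) (dic.insert b a) lst (res ++ [-1])

def func (rains : List Int) : List Int :=
  match loopA rains 0 .empty [] [] with
  | none => []
  | some res => res.map (fun j => if j = 0 then 1 else j)  -- final 'if not j: res[i] = 1' pass

-- ===== PORT B =====
-- hand-written bisect_right of Source B: 'while lo < hi: mid = (lo+hi)//2; …'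
-- fuel = hi - lo, the loop's own decreasing measure (kernel-reducible guard, not a new algorithm)
def bsearchF (dry : List Nat) (x : Nat) : Nat → Nat → Nat → Nat
  | 0, lo, _ => lo
  | fuel + 1, lo, hi =>
    if lo < hi then
      let mid := (lo + hi) / 2
      if dry.getD mid 0 ≤ x then bsearchF dry x fuel (mid + 1) hi
      else bsearchF dry x fuel lo mid
    else lo

def bsearch (dry : List Nat) (x : Nat) (lo hi : Nat) : Nat :=
  bsearchF dry x (hi - lo) lo hi

def loopB : List Int → Nat → PySem.Dict Int Nat → List Nat → List Int → Option (List Int)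
  | [], _, _, _, res => some res
  | lake :: rs, day, last, dry, res =>
    if lake = 0 then
      loopB rs (day + 1) last (dry ++ [day]) (res ++ [0])
    else
      match last.get? lake with
      | some d =>
        let k := bsearch dry d 0 dry.length
        if k = dry.length then none
        else
          let j := dry.getD k 0   -- 'j = dry.pop(k)' (k < len(dry) here)
          loopB rs (day + 1) (last.insert lake day) (dry.eraseIdx k) ((res.set j lake) ++ [-1])
      | none => loopB rs (day + 1) (last.insert lake day) dry (res ++ [-1])

def func_alt (rains : List Int) : List Int :=
  match loopB rains 0 .empty [] [] with
  | none => []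
  | some res => res.map (fun v => if v = 0 then 1 else v)

-- ===== PRECONDITION & SPEC =====
def Spec_func (rains : List Int) (out : List Int) : Prop := out = func_alt rains
instance (rains : List Int) (out : List Int) : Decidable (Spec_func rains out) := by unfold Spec_func; infer_instance

-- ===== CLAIM (what is proved, stated in full; the proofs are below) =====
def Claim_equal_func : Prop := ∀ (rains : List Int), Dom_func rains → Spec_func rains (func rains)


-- ===== LEMMAS AND PROOFS =====

-- elements inside the ≤-prefix are ≤ x
theorem tw_getElem_le {x : Nat} (l : List Nat) (i : Nat)
    (h : i < (l.takeWhile (fun j => j ≤ x)).length) (hl : i < l.length) : l[i] ≤ x := by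
  induction l generalizing i with
  | nil => simp at hl
  | cons j rest ih =>
    by_cases hj : j ≤ x
    · cases i with
      | zero => simpa using hj
      | succ i =>
        simp only [List.takeWhile_cons, decide_eq_true_eq, if_pos hj, List.length_cons] at h
        simpa using ih i (by omega) (by simpa using hl)
    · simp [hj] at h
-- the element right after the ≤-prefix (if any) is > x
theorem tw_getElem_gt {x : Nat} (l : List Nat)
    (h : (l.takeWhile (fun j => j ≤ x)).length < l.length) :
    x < l[(l.takeWhile (fun j => j ≤ x)).length] := by
  induction l with
  | nil => simp at h
  | cons j rest ih =>
    by_cases hj : j ≤ x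
    · simp only [List.takeWhile_cons, decide_eq_true_eq, if_pos hj, List.length_cons] at h ⊢
      simpa using ih (by omega)
    · simp [hj, Nat.lt_of_not_le hj]

-- findPop pops the element at the end of the ≤-prefix (no sortedness needed)
theorem findPop_eq (d : Nat) (lst : List Nat) :
    findPop d lst =
      if h : (lst.takeWhile (fun j => j ≤ d)).length < lst.length then
        some (lst[(lst.takeWhile (fun j => j ≤ d)).length],
              lst.eraseIdx (lst.takeWhile (fun j => j ≤ d)).length)
      else none := by
  induction lst with
  | nil => simp [findPop]
  | cons j rest ih =>
    by_cases hj : d < j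
    · have hj' : ¬ (j ≤ d) := by omega
      simp [findPop, hj, hj']
    · have hj' : j ≤ d := by omega
      rw [show findPop d (j :: rest) = (findPop d rest).map (fun p => (p.1, j :: p.2)) by
            simp [findPop, hj]]
      rw [ih]
      simp only [List.takeWhile_cons, decide_eq_true_eq, if_pos hj', List.length_cons]
      by_cases h' : (rest.takeWhile (fun j => j ≤ d)).length < rest.length
      · rw [dif_pos h', dif_pos (by simpa using Nat.succ_lt_succ h')]
        simp [List.eraseIdx_cons_succ]
      · rw [dif_neg h', dif_neg (by omega)]
        rfl

-- on a ≤-sorted list, the search interval invariant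
theorem bsearch_inv (dry : List Nat) (x : Nat) (hs : dry.Pairwise (· ≤ ·)) :
    ∀ n lo hi, hi - lo ≤ n → hi ≤ dry.length →
      lo ≤ (dry.takeWhile (fun j => j ≤ x)).length →
      (dry.takeWhile (fun j => j ≤ x)).length ≤ hi →
      bsearchF dry x n lo hi = (dry.takeWhile (fun j => j ≤ x)).length := by
  intro n
  induction n with
  | zero =>
    intro lo hi hfuel _ hlo hhi
    simp only [bsearchF]
    omega
  | succ n ih =>
    intro lo hi hfuel hlen hlo hhi
    simp only [bsearchF]
    by_cases hlt : lo < hi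
    · rw [if_pos hlt]
      have hmid : (lo + hi) / 2 < dry.length := by omega
      have hget : dry.getD ((lo + hi) / 2) 0 = dry[(lo + hi) / 2] :=
        List.getD_eq_getElem dry 0 hmid
      by_cases hc : dry.getD ((lo + hi) / 2) 0 ≤ x
      · rw [if_pos hc]
        -- mid < t : otherwise dry[t] > x but dry[t] ≤ dry[mid] ≤ x
        have hmt : (lo + hi) / 2 < (dry.takeWhile (fun j => j ≤ x)).length := by
          by_contra hcon
          have ht : (dry.takeWhile (fun j => j ≤ x)).length < dry.length := by omega
          have hgt := tw_getElem_gt (x := x) dry ht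
          rcases Nat.lt_or_ge ((dry.takeWhile (fun j => j ≤ x)).length) ((lo + hi) / 2) with hcase | hcase
          · have := List.pairwise_iff_getElem.mp hs _ _ ht hmid hcase
            rw [hget] at hc; omega
          · have heq : (dry.takeWhile (fun j => j ≤ x)).length = (lo + hi) / 2 := by omega
            have hgt' : x < dry[(lo + hi) / 2] := by
              simp only [heq] at hgt; exact hgt
            rw [hget] at hc; omega
        exact ih ((lo + hi) / 2 + 1) hi (by omega) hlen (by omega) hhi
      · rw [if_neg hc]
        -- t ≤ mid : dry[mid] > x so the prefix stops at or before mid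
        have hmt : (dry.takeWhile (fun j => j ≤ x)).length ≤ (lo + hi) / 2 := by
          by_contra hcon
          have := tw_getElem_le (x := x) dry ((lo + hi) / 2) (by omega) hmid
          rw [hget] at hc; omega
        exact ih lo ((lo + hi) / 2) (by omega) (by omega) hlo hmt
    · rw [if_neg hlt]; omega

theorem bsearch_eq (dry : List Nat) (x : Nat) (hs : dry.Pairwise (· ≤ ·)) :
    bsearch dry x 0 dry.length = (dry.takeWhile (fun j => j ≤ x)).length :=
  bsearch_inv dry x hs (dry.length - 0) 0 dry.length (by omega) le_rfl (by omega)
    (List.takeWhile_prefix _).length_le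

theorem loop_eq (l : List Int) (a : Nat) (dic : PySem.Dict Int Nat)
    (lst : List Nat) (res : List Int)
    (hs : lst.Pairwise (· < ·)) (hb : ∀ j ∈ lst, j < a) :
    loopA l a dic lst res = loopB l a dic lst res := by
  induction l generalizing a dic lst res with
  | nil => rfl
  | cons b rs ih =>
    by_cases hb0 : b = 0
    · subst hb0
      rw [show loopA (0 :: rs) a dic lst res = loopA rs (a+1) dic (lst ++ [a]) (res ++ [0]) by
            simp [loopA]]
      rw [show loopB (0 :: rs) a dic lst res = loopB rs (a+1) dic (lst ++ [a]) (res ++ [0]) by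
            simp [loopB]]
      apply ih
      · exact List.pairwise_append.mpr ⟨hs, by simp, by simpa using hb⟩
      · intro j hj
        rcases List.mem_append.mp hj with h | h
        · exact Nat.lt_succ_of_lt (hb j h)
        · simp at h; omega
    · cases hd : dic.get? b with
      | none =>
        rw [show loopA (b :: rs) a dic lst res
              = loopA rs (a + 1) (dic.insert b a) lst (res ++ [-1]) by
            simp [loopA, hb0, hd]]
        rw [show loopB (b :: rs) a dic lst res
              = loopB rs (a + 1) (dic.insert b a) lst (res ++ [-1]) by
            simp [loopB, hb0, hd]]
        exact ih (a + 1) (dic.insert b a) lst (res ++ [-1]) hs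
          (fun j hj => Nat.lt_succ_of_lt (hb j hj))
      | some db =>
        rw [show loopA (b :: rs) a dic lst res
              = (match findPop db lst with
                 | some (j, lst') =>
                   loopA rs (a + 1) (dic.insert b a) lst' ((res.set j b) ++ [-1])
                 | none => none) by
            simp [loopA, hb0, hd]]
        rw [show loopB (b :: rs) a dic lst res
              = (if bsearch lst db 0 lst.length = lst.length then none
                 else loopB rs (a + 1) (dic.insert b a)
                        (lst.eraseIdx (bsearch lst db 0 lst.length))
                        ((res.set (lst.getD (bsearch lst db 0 lst.length) 0) b) ++ [-1])) by
            simp [loopB, hb0, hd]]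
        rw [bsearch_eq lst db (hs.imp Nat.le_of_lt), findPop_eq]
        by_cases ht : (lst.takeWhile (fun j => j ≤ db)).length < lst.length
        · rw [dif_pos ht, if_neg (by omega)]
          rw [List.getD_eq_getElem lst 0 ht]
          apply ih
          · exact hs.sublist (List.eraseIdx_sublist lst _)
          · intro j hj
            exact Nat.lt_succ_of_lt (hb j (List.mem_of_mem_eraseIdx hj))
        · rw [dif_neg ht,
              if_pos (by have := (List.takeWhile_prefix
                (fun j => decide (j ≤ db)) (l := lst)).length_le; omega)]

-- ===== VERDICT (by name: the statement is the Claim_ definition above) =====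
theorem func_spec : Claim_equal_func := by
  intro rains _
  unfold Spec_func func func_alt
  rw [loop_eq _ _ _ _ _ (by simp) (by simp)]
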